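-- pv_equiv track=rewrite | github.com/bifold-pathomics/PathoROB | pathorob/apd/utils/build_splits.py | getPatchesMapToSplit
-- ===== SOURCE A (Python) =====
-- def getPatchesMapToSplit(dataset, split, num_patches_per_slide):
--     """
--     Calculate number of training patches per category (med_center-bio_class-combination) for a given split.
--
--     Args:
--         dataset (str): The selected dataset; either `camelyon`, `tcga`, or `tolkach_esca`.
--         split (int: [0, ..., splits-1]): The split for which the numbers are calculated.
--         num_patches_per_slide (int): Number of patches per slide for downstream experiment.
--
--     Returns:
--         list of tuples (i, j, num_paches): List of numbers of training patches (num_patches) per category: med_center(i)-bio_class(j)-combination.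
--         int: Maximum number of training slides per category.
--     """
--     if dataset == "camelyon":
--         tss0_pairs = [(0, 0, (7 - split) * num_patches_per_slide), (0, 1, (7 + split) * num_patches_per_slide)]
--         tss1_pairs = [(1, 0, (7 + split) * num_patches_per_slide), (1, 1, (7 - split) * num_patches_per_slide)]
--         return sorted(tss0_pairs + tss1_pairs), 14
--
--     elif dataset == "tcga":
--         diag_pairs = [(i, j, (split + 2) * num_patches_per_slide) for i in range(4) for j in range(4) if i == j]
--         inv_diag_pairs = [(i, j, (1 if split % 2 == 1 else (2 if split < 3 else 0)) * num_patches_per_slide) for i in range(4) for j in range(4) if i + j == 3]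
--         rest_pairs = [(i, j, (2 if split < 2 else (1 if split < 5 else 0)) * num_patches_per_slide) for i in range(4) for j in range(4) if i != j and i + j != 3]
--         return sorted(diag_pairs + inv_diag_pairs + rest_pairs), 8
--
--     else:
--         tss0_pairs = [(0, j, (3 - split) * num_patches_per_slide) for j in range(3)] + [(0, j, (3 + split) * num_patches_per_slide) for j in range(3, 6)]
--         tss1_pairs = [(1, j, (3 + split) * num_patches_per_slide) for j in range(3)] + [(1, j, (3 - split) * num_patches_per_slide) for j in range(3, 6)]
--         return sorted(tss0_pairs + tss1_pairs), 6
-- ===== SOURCE B (Python) =====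
-- def getPatchesMapToSplit(dataset, split, num_patches_per_slide):
--     """Single ordered row-major pass that classifies each (center, class) cell
--     directly, producing the list already in sorted order (no sort call)."""
--     if dataset == "camelyon":
--         pairs = []
--         for i in range(2):
--             for j in range(2):
--                 n = (7 - split if i == j else 7 + split) * num_patches_per_slide
--                 pairs.append((i, j, n))
--         return pairs, 14
--     elif dataset == "tcga":
--         pairs = []
--         for i in range(4):
--             for j in range(4):
--                 if i == j:
--                     n = (split + 2) * num_patches_per_slide
--                 elif i + j == 3:
--                     n = (1 if split % 2 == 1 else (2 if split < 3 else 0)) * num_patches_per_slide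
--                 else:
--                     n = (2 if split < 2 else (1 if split < 5 else 0)) * num_patches_per_slide
--                 pairs.append((i, j, n))
--         return pairs, 8
--     else:
--         pairs = []
--         for i in range(2):
--             for j in range(6):
--                 n = (3 - split if (i == 0) == (j < 3) else 3 + split) * num_patches_per_slide
--                 pairs.append((i, j, n))
--         return pairs, 6
-- ===== Notes on version B (the rewrite author's own statement) =====
-- stated objective: simpler
-- what changed: A builds each category group with separate filtered comprehensions, concatenates them and calls sorted(); B does one row-major double loop over the (center, class) grid that classifies each cell and appends its count, producing the list already in order with no sort call.
import Mathlib
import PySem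

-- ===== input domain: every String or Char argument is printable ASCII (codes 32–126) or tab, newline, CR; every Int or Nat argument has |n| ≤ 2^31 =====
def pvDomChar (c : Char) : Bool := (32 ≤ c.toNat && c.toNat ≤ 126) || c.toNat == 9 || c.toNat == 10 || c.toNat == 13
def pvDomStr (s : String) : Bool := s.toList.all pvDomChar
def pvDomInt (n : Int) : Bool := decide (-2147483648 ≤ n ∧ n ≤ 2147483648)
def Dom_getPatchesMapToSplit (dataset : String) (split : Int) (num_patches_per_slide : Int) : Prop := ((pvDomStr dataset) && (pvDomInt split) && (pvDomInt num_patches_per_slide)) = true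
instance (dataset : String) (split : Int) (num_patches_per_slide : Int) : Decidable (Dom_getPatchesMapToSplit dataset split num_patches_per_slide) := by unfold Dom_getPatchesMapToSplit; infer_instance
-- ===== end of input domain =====

-- B replaces A's "build each category group, concatenate, then sorted()" by a single
-- row-major double loop that classifies each cell, emitting the list already in order
-- (no sort call); objective: simpler.

-- A-side helpers: Python's sorted() on a list of int 3-tuples compares tuples
-- lexicographically; pvKey/pySortTriples express exactly that key.
@[reducible] def pvLO : LinearOrder (Lex (Int × Lex (Int × Int))) := inferInstance
def pvKey (t : Int × Int × Int) : Lex (Int × Lex (Int × Int)) := toLex (t.1, toLex (t.2.1, t.2.2))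
def pySortTriples (xs : List (Int × Int × Int)) : List (Int × Int × Int) :=
  @PySem.List.sorted _ _ pvLO.toLT pvLO.toDecidableLT xs pvKey false

-- ===== PORT A =====
def getPatchesMapToSplit (dataset : String) (split : Int) (num_patches_per_slide : Int) : (List (Int × Int × Int)) × Int :=
  if dataset = "camelyon" then
    let tss0_pairs : List (Int × Int × Int) :=
      [(0, 0, (7 - split) * num_patches_per_slide), (0, 1, (7 + split) * num_patches_per_slide)]
    let tss1_pairs : List (Int × Int × Int) :=
      [(1, 0, (7 + split) * num_patches_per_slide), (1, 1, (7 - split) * num_patches_per_slide)]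
    (pySortTriples (tss0_pairs ++ tss1_pairs), 14)
  else if dataset = "tcga" then
    let diag_pairs : List (Int × Int × Int) :=
      (PySem.List.pyRange 0 4 1).flatMap (fun i =>
        (((PySem.List.pyRange 0 4 1).filter (fun j => i == j)).map (fun j =>
          (i, j, (split + 2) * num_patches_per_slide))))
    let inv_diag_pairs : List (Int × Int × Int) :=
      (PySem.List.pyRange 0 4 1).flatMap (fun i =>
        (((PySem.List.pyRange 0 4 1).filter (fun j => i + j == 3)).map (fun j =>
          (i, j, (if PySem.Int.mod split 2 = 1 then 1 else if split < 3 then 2 else 0) * num_patches_per_slide))))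
    let rest_pairs : List (Int × Int × Int) :=
      (PySem.List.pyRange 0 4 1).flatMap (fun i =>
        (((PySem.List.pyRange 0 4 1).filter (fun j => i != j && i + j != 3)).map (fun j =>
          (i, j, (if split < 2 then 2 else if split < 5 then 1 else 0) * num_patches_per_slide))))
    (pySortTriples (diag_pairs ++ inv_diag_pairs ++ rest_pairs), 8)
  else
    let tss0_pairs : List (Int × Int × Int) :=
      (PySem.List.pyRange 0 3 1).map (fun j => ((0 : Int), j, (3 - split) * num_patches_per_slide))
        ++ (PySem.List.pyRange 3 6 1).map (fun j => ((0 : Int), j, (3 + split) * num_patches_per_slide))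
    let tss1_pairs : List (Int × Int × Int) :=
      (PySem.List.pyRange 0 3 1).map (fun j => ((1 : Int), j, (3 + split) * num_patches_per_slide))
        ++ (PySem.List.pyRange 3 6 1).map (fun j => ((1 : Int), j, (3 - split) * num_patches_per_slide))
    (pySortTriples (tss0_pairs ++ tss1_pairs), 6)

-- ===== PORT B =====
def getPatchesMapToSplit_alt (dataset : String) (split : Int) (num_patches_per_slide : Int) : (List (Int × Int × Int)) × Int :=
  if dataset = "camelyon" then
    ((PySem.List.pyRange 0 2 1).foldl (fun acc i =>
      (PySem.List.pyRange 0 2 1).foldl (fun acc j =>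
        acc ++ [(i, j, (if i = j then 7 - split else 7 + split) * num_patches_per_slide)]) acc) [], 14)
  else if dataset = "tcga" then
    ((PySem.List.pyRange 0 4 1).foldl (fun acc i =>
      (PySem.List.pyRange 0 4 1).foldl (fun acc j =>
        acc ++ [(i, j,
          if i = j then (split + 2) * num_patches_per_slide
          else if i + j = 3 then (if PySem.Int.mod split 2 = 1 then 1 else if split < 3 then 2 else 0) * num_patches_per_slide
          else (if split < 2 then 2 else if split < 5 then 1 else 0) * num_patches_per_slide)]) acc) [], 8)
  else
    ((PySem.List.pyRange 0 2 1).foldl (fun acc i =>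
      (PySem.List.pyRange 0 6 1).foldl (fun acc j =>
        acc ++ [(i, j, (if (decide (i = 0)) = (decide (j < 3)) then 3 - split else 3 + split) * num_patches_per_slide)]) acc) [], 6)

-- ===== PRECONDITION & SPEC =====
def Spec_getPatchesMapToSplit (dataset : String) (split : Int) (num_patches_per_slide : Int) (out : (List (Int × Int × Int)) × Int) : Prop := out = getPatchesMapToSplit_alt dataset split num_patches_per_slide
instance (dataset : String) (split : Int) (num_patches_per_slide : Int) (out : (List (Int × Int × Int)) × Int) : Decidable (Spec_getPatchesMapToSplit dataset split num_patches_per_slide out) := by unfold Spec_getPatchesMapToSplit; infer_instance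

-- ===== CLAIM (what is proved, stated in full; the proofs are below) =====
def Claim_equal_getPatchesMapToSplit : Prop := ∀ (dataset : String) (split : Int) (num_patches_per_slide : Int), Dom_getPatchesMapToSplit dataset split num_patches_per_slide → Spec_getPatchesMapToSplit dataset split num_patches_per_slide (getPatchesMapToSplit dataset split num_patches_per_slide)

-- ===== LEMMAS AND PROOFS =====

lemma sorted_cam (x y : Int) :
    pySortTriples [((0:Int),(0:Int),x),(0,1,y),(1,0,y),(1,1,x)]
      = [(0,0,x),(0,1,y),(1,0,y),(1,1,x)] := by
  unfold pySortTriples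
  refine @PySem.List.sorted_eq_of_perm_of_pairwise_lt _ _ pvLO _ _ pvKey (List.Perm.refl _) ?_
  simp [pvKey, List.pairwise_cons, Prod.Lex.toLex_lt_toLex]

lemma sorted_tol (x y : Int) :
    pySortTriples
      [((0:Int),(0:Int),x),(0,1,x),(0,2,x),(0,3,y),(0,4,y),(0,5,y),
       (1,0,y),(1,1,y),(1,2,y),(1,3,x),(1,4,x),(1,5,x)]
      = [(0,0,x),(0,1,x),(0,2,x),(0,3,y),(0,4,y),(0,5,y),
         (1,0,y),(1,1,y),(1,2,y),(1,3,x),(1,4,x),(1,5,x)] := by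
  unfold pySortTriples
  refine @PySem.List.sorted_eq_of_perm_of_pairwise_lt _ _ pvLO _ _ pvKey (List.Perm.refl _) ?_
  simp [pvKey, List.pairwise_cons, Prod.Lex.toLex_lt_toLex]

def pvG (d v r : Int) (p : Int × Int) : Int × Int × Int :=
  (p.1, p.2, if p.1 = p.2 then d else if p.1 + p.2 = 3 then v else r)

set_option maxHeartbeats 1000000 in
lemma sorted_tcga (d v r : Int) :
    pySortTriples
      (([((0:Int),(0:Int)),(1,1),(2,2),(3,3),(0,3),(1,2),(2,1),(3,0),
         (0,1),(0,2),(1,0),(1,3),(2,0),(2,3),(3,1),(3,2)]).map (pvG d v r))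
      = ([((0:Int),(0:Int)),(0,1),(0,2),(0,3),(1,0),(1,1),(1,2),(1,3),
          (2,0),(2,1),(2,2),(2,3),(3,0),(3,1),(3,2),(3,3)]).map (pvG d v r) := by
  unfold pySortTriples
  refine @PySem.List.sorted_eq_of_perm_of_pairwise_lt _ _ pvLO _ _ pvKey
    (List.Perm.map _ (by decide)) ?_
  simp [pvG, pvKey, List.pairwise_cons, Prod.Lex.toLex_lt_toLex]

-- ===== VERDICT (by name: the statement is the Claim_ definition above) =====
set_option maxHeartbeats 1000000 in
theorem getPatchesMapToSplit_spec : Claim_equal_getPatchesMapToSplit := by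
  intro dataset split npp _
  unfold Spec_getPatchesMapToSplit
  by_cases h1 : dataset = "camelyon"
  · simp only [getPatchesMapToSplit, getPatchesMapToSplit_alt, if_pos h1, Prod.mk.injEq]
    refine ⟨(sorted_cam ((7 - split) * npp) ((7 + split) * npp)).trans ?_, trivial⟩
    rfl
  · by_cases h2 : dataset = "tcga"
    · simp only [getPatchesMapToSplit, getPatchesMapToSplit_alt, if_neg h1, if_pos h2, Prod.mk.injEq]
      refine ⟨(sorted_tcga ((split + 2) * npp)
        ((if PySem.Int.mod split 2 = 1 then 1 else if split < 3 then 2 else 0) * npp)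
        ((if split < 2 then 2 else if split < 5 then 1 else 0) * npp)).trans ?_, trivial⟩
      rfl
    · simp only [getPatchesMapToSplit, getPatchesMapToSplit_alt, if_neg h1, if_neg h2, Prod.mk.injEq]
      refine ⟨(sorted_tol ((3 - split) * npp) ((3 + split) * npp)).trans ?_, trivial⟩
      rfl
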